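-- pv_equiv track=rewrite | github.com/asashepard/aspectcode | server/rules/bug_assignment_in_conditional.py | _find_lone_assignment_equals
-- ===== SOURCE A (Python) =====
-- from typing import List, Set, Dict, Iterable, Optional
--
-- def _find_lone_assignment_equals(condition: str) -> Optional[int]:
--     """
--     Find the position of a lone assignment '=' in the condition.
--
--     Excludes:
--     - '==', '===', '!=', '<=', '>='
--     - '=>' (arrow functions)
--     - assignments that are part of comparison idioms
--
--     Returns the character position of '=' or None if not found.
--     """
--     condition = condition.strip()
--
--     # Find all '=' characters that are not part of compound operators
--     lone_equals_positions = []
--     i = 0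
--     while i < len(condition):
--         if condition[i] == '=':
--             # Check if it's part of a compound operator
--             prev_char = condition[i-1] if i > 0 else ''
--             next_char = condition[i+1] if i+1 < len(condition) else ''
--
--             # Skip compound operators
--             if prev_char in ['<', '>', '!', '='] or next_char in ['=', '>']:
--                 i += 1
--                 continue
--
--             # Found a lone '=' - record its position
--             lone_equals_positions.append(i)
--
--         i += 1
--
--     # If no lone equals found, return None
--     if not lone_equals_positions:
--         return None
--
--     # For each lone equals, check if it's part of an assignment-in-comparison idiom
--     for pos in lone_equals_positions:
--         # Check if this specific assignment is part of a comparison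
--         # Look for comparison operators after this assignment
--         rest_of_condition = condition[pos+1:]
--
--         # Common patterns that indicate assignment-in-comparison:
--         # - Assignment followed by comparison: (x = f()) != value
--         # - Assignment with EOF: (ch = getchar()) != EOF
--         if any(op in rest_of_condition for op in ['!=', '==', '<=', '>=', '<', '>', '===', '!==']):
--             # Check if this is a direct assignment-comparison pattern
--             # by looking at the structure around this equals
--             before_assignment = condition[:pos].strip()
--             if before_assignment.count('(') > before_assignment.count(')'):
--                 # This assignment is inside parentheses, likely assignment-in-comparison
--                 # But we need to check if it's the whole condition or just part
--
--                 # If there are logical operators (&&, ||) then this might be legitimate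
--                 if any(op in condition for op in ['&&', '||']):
--                     # This is a complex expression, flag the assignment
--                     return pos
--                 else:
--                     # Simple assignment-in-comparison, skip it
--                     continue
--             else:
--                 # Assignment not in parentheses, flag it
--                 return pos
--         else:
--             # No comparison operators after this assignment, flag it
--             return pos
--
--     return None
-- ===== SOURCE B (Python) =====
-- from typing import Optional
--
-- def _find_lone_assignment_equals(condition: str) -> Optional[int]:
--     # Single streaming scan: a running parenthesis balance replaces the
--     # recomputed before-substring counts; the logical-operator flag is computed once.
--     s = condition.strip()
--     n = len(s)
--     has_logical = '&&' in s or '||' in s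
--     bal = 0  # parenthesis balance of s[:i]
--     for i, ch in enumerate(s):
--         if ch == '=' and not ((i > 0 and s[i - 1] in '<>!=')
--                               or (i + 1 < n and s[i + 1] in '=>')):
--             rest = s[i + 1:]
--             if (bal <= 0 or has_logical
--                     or not ('<' in rest or '>' in rest
--                             or '==' in rest or '!=' in rest)):
--                 return i
--             # lone '=' inside unmatched '(' with a comparison after it and
--             # no &&/||: assignment-in-comparison idiom, keep scanning
--         elif ch == '(':
--             bal += 1
--         elif ch == ')':
--             bal -= 1
--     return None
-- ===== Notes on version B (the rewrite author's own statement) =====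
-- stated objective: alternative
-- what changed: A's two-pass design (collect all lone assignment positions, then re-scan each candidate's prefix to count parentheses and its suffix for eight comparison operators) is fused into one streaming scan that maintains a running parenthesis balance, precomputes the logical-operator flag once, and tests only the four non-redundant comparison operators in the suffix.
import Mathlib
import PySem

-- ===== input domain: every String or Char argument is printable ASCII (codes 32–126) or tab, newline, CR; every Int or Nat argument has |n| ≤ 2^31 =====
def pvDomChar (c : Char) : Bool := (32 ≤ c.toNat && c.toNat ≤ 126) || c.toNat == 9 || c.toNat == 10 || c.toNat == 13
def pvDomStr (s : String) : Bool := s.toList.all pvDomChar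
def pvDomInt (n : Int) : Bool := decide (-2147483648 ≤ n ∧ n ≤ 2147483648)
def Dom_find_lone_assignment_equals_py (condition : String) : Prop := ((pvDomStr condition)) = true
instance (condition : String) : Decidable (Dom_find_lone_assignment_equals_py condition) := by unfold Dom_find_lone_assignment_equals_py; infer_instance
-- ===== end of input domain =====

-- B fuses A's two passes into one streaming scan with a running paren balance and a
-- precomputed &&/|| flag (objective: alternative decomposition, same observable result).

-- ===== PORT A =====
-- condition[i] == '=' and the compound-operator guard of A's first while loop
def pvAIsLone (s : List Char) (i : Nat) : Bool :=
  if PySem.List.pyGetD s (i : Int) ' ' == '=' then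
    let prevSkip : Bool :=
      if 0 < i then
        let p := PySem.List.pyGetD s ((i : Int) - 1) ' '
        p == '<' || p == '>' || p == '!' || p == '='
      else false   -- prev_char is '' : matches none of '<' '>' '!' '='
    let nextSkip : Bool :=
      if i + 1 < s.length then
        let nx := PySem.List.pyGetD s ((i : Int) + 1) ' '
        nx == '=' || nx == '>'
      else false   -- next_char is '' : matches neither '=' nor '>'
    !(prevSkip || nextSkip)
  else false

-- the while loop (i advances by 1 on every path: a scan of range(len(condition)))
def pvAPositions (s : List Char) : List Nat :=
  (List.range s.length).foldl (fun acc i => if pvAIsLone s i then acc ++ [i] else acc) []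

-- any(op in rest_of_condition for op in ['!=', '==', '<=', '>=', '<', '>', '===', '!=='])
def pvAHasCmpAfter (r : List Char) : Bool :=
  PySem.Chars.isIn ['!','='] r || PySem.Chars.isIn ['=','='] r || PySem.Chars.isIn ['<','='] r ||
  PySem.Chars.isIn ['>','='] r || PySem.Chars.isIn ['<'] r || PySem.Chars.isIn ['>'] r ||
  PySem.Chars.isIn ['=','=','='] r || PySem.Chars.isIn ['!','=','='] r

-- any(op in condition for op in ['&&', '||'])
def pvAHasLogical (s : List Char) : Bool :=
  PySem.Chars.isIn ['&','&'] s || PySem.Chars.isIn ['|','|'] s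

-- the 'for pos in lone_equals_positions' loop
def pvALoop (s : List Char) : List Nat → Option Int
  | [] => none
  | pos :: rest =>
    let restOf := PySem.List.slice s (some ((pos : Int) + 1)) none
    if pvAHasCmpAfter restOf then
      let before := PySem.Chars.strip (PySem.List.slice s none (some (pos : Int)))
      if PySem.Chars.count before [')'] < PySem.Chars.count before ['('] then
        if pvAHasLogical s then some (pos : Int) else pvALoop s rest
      else some (pos : Int)
    else some (pos : Int)

def find_lone_assignment_equals_py (condition : String) : Option Int :=
  let s := PySem.Chars.strip condition.toList
  let ps := pvAPositions s
  if ps.isEmpty then none else pvALoop s ps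

-- ===== PORT B =====
def pvBHasLogical (s : List Char) : Bool :=
  PySem.Chars.isIn ['&','&'] s || PySem.Chars.isIn ['|','|'] s

-- '<' in rest or '>' in rest or '==' in rest or '!=' in rest
def pvBHasCmp (r : List Char) : Bool :=
  PySem.Chars.isIn ['<'] r || PySem.Chars.isIn ['>'] r ||
  PySem.Chars.isIn ['=','='] r || PySem.Chars.isIn ['!','='] r

-- the single for-loop of B: (ch, i) from enumerate(s), bal = parenthesis balance of s[:i]
def pvBGo (s : List Char) (hasLog : Bool) : List (Char × Nat) → Int → Option Int
  | [], _ => none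
  | (ch, i) :: rest, bal =>
    if ch == '=' &&
       !((decide (0 < i) && PySem.Chars.isIn [s.getD (i - 1) ' '] ['<','>','!','=']) ||
         (decide (i + 1 < s.length) && PySem.Chars.isIn [s.getD (i + 1) ' '] ['=','>'])) then
      if decide (bal ≤ 0) || hasLog || !pvBHasCmp (s.drop (i + 1)) then some (i : Int)
      else pvBGo s hasLog rest bal
    else if ch == '(' then pvBGo s hasLog rest (bal + 1)
    else if ch == ')' then pvBGo s hasLog rest (bal - 1)
    else pvBGo s hasLog rest bal

def find_lone_assignment_equals_py_alt (condition : String) : Option Int :=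
  let s := PySem.Chars.strip condition.toList
  pvBGo s (pvBHasLogical s) s.zipIdx 0

-- ===== PRECONDITION & SPEC =====
def Spec_find_lone_assignment_equals_py (condition : String) (out : Option Int) : Prop := out = find_lone_assignment_equals_py_alt condition
instance (condition : String) (out : Option Int) : Decidable (Spec_find_lone_assignment_equals_py condition out) := by unfold Spec_find_lone_assignment_equals_py; infer_instance

-- ===== CLAIM (what is proved, stated in full; the proofs are below) =====
def Claim_equal_find_lone_assignment_equals_py : Prop := ∀ (condition : String), Dom_find_lone_assignment_equals_py condition → Spec_find_lone_assignment_equals_py condition (find_lone_assignment_equals_py condition)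

-- ===== LEMMAS AND PROOFS =====

-- running paren balance of B at index i, expressed as counts over s[:i]
def pvBalance (s : List Char) (i : Nat) : Int :=
  ((s.take i).count '(' : Int) - ((s.take i).count ')' : Int)

-- the return-vs-skip decision both programs take at a lone '='
def pvRet (s : List Char) (hasLog : Bool) (i : Nat) : Bool :=
  decide (pvBalance s i ≤ 0) || hasLog || !pvBHasCmp (s.drop (i + 1))

def pvHit (s : List Char) (hasLog : Bool) (i : Nat) : Bool :=
  pvAIsLone s i && pvRet s hasLog i

theorem pv_find?_congr {α : Type} (p q : α → Bool) (l : List α)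
    (h : ∀ x ∈ l, p x = q x) : l.find? p = l.find? q := by
  induction l with
  | nil => rfl
  | cons a t ih =>
    simp only [List.find?_cons]
    rw [h a (List.mem_cons_self)]
    cases q a
    · exact ih (fun x hx => h x (List.mem_cons_of_mem _ hx))
    · rfl

theorem pv_count_go_single (c : Char) :
    ∀ (fuel : Nat) (l : List Char) (acc : Nat), l.length ≤ fuel →
      PySem.Chars.count.go [c] fuel l acc = acc + l.count c := by
  intro fuel
  induction fuel with
  | zero =>
    intro l acc h
    have : l = [] := List.length_eq_zero_iff.mp (Nat.le_zero.mp h)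
    subst this
    simp [PySem.Chars.count.go]
  | succ f ih =>
    intro l acc h
    cases l with
    | nil => simp [PySem.Chars.count.go]
    | cons hd t =>
      rw [PySem.Chars.count.go]
      simp only [List.isPrefixOf, Bool.and_true]
      by_cases hc : c = hd
      · subst hc
        simp only [beq_self_eq_true, if_pos, List.length_cons, List.length_nil,
          List.drop_succ_cons, List.drop_zero]
        rw [ih t (acc + 1) (by simpa using h)]
        simp
        omega
      · rw [if_neg (by simp [hc])]
        rw [ih t acc (by simpa using h)]
        simp [Ne.symm hc]

theorem pv_count_single (c : Char) (l : List Char) :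
    PySem.Chars.count l [c] = l.count c := by
  rw [PySem.Chars.count, if_neg (by simp)]
  simpa using pv_count_go_single c l.length l 0 le_rfl

theorem pv_count_dropWhile (c : Char) (p : Char → Bool) (l : List Char) (h : p c = false) :
    (l.dropWhile p).count c = l.count c := by
  conv_rhs => rw [← List.takeWhile_append_dropWhile (p := p) (l := l)]
  rw [List.count_append]
  have : (l.takeWhile p).count c = 0 := by
    refine List.count_eq_zero.mpr (fun hm => ?_)
    have := List.mem_takeWhile_imp hm
    simp [h] at this
  omega

theorem pv_count_strip (c : Char) (l : List Char) (h : PySem.Chars.isspace c = false) :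
    (PySem.Chars.strip l).count c = l.count c := by
  rw [PySem.Chars.strip, PySem.Chars.rstrip, PySem.Chars.lstrip, List.count_reverse,
    pv_count_dropWhile c _ _ h, List.count_reverse, pv_count_dropWhile c _ _ h]

theorem pv_mem_singleton_isIn (q : Char) (cs : List Char) :
    PySem.Chars.isIn [q] cs = cs.contains q := by
  rw [Bool.eq_iff_iff, PySem.Chars.isIn_iff_infix, List.contains_iff_mem]
  constructor
  · intro hinf
    exact List.IsInfix.subset hinf (by simp)
  · intro hm
    obtain ⟨s, t, rfl⟩ := List.mem_iff_append.mp hm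
    exact ⟨s, t, by simp⟩

theorem pv_cmp_eq (r : List Char) : pvAHasCmpAfter r = pvBHasCmp r := by
  unfold pvAHasCmpAfter pvBHasCmp
  rw [Bool.eq_iff_iff]
  simp only [Bool.or_eq_true, PySem.Chars.isIn_iff_infix]
  constructor
  · rintro (((((((h|h)|h)|h)|h)|h)|h)|h)
    · tauto
    · tauto
    · exact Or.inl (Or.inl (Or.inl (List.IsInfix.trans (by decide) h)))
    · exact Or.inl (Or.inl (Or.inr (List.IsInfix.trans (by decide) h)))
    · tauto
    · tauto
    · exact Or.inl (Or.inr (List.IsInfix.trans (by decide) h))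
    · exact Or.inr (List.IsInfix.trans (by decide) h)
  · rintro (((h|h)|h)|h) <;> tauto

theorem pvALoop_cons (s : List Char) (pos : Nat) (rest : List Nat) :
    pvALoop s (pos :: rest) =
      if pvRet s (pvAHasLogical s) pos then some (pos : Int) else pvALoop s rest := by
  have hs1 : ∀ l : List Char, (PySem.Chars.strip l).count ')' = l.count ')' :=
    fun l => pv_count_strip _ l (by decide)
  have hs2 : ∀ l : List Char, (PySem.Chars.strip l).count '(' = l.count '(' :=
    fun l => pv_count_strip _ l (by decide)
  rw [pvALoop]
  rw [show ((pos : Int) + 1) = ((pos + 1 : Nat) : Int) by omega]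
  rw [PySem.List.slice_from_natCast, PySem.List.slice_to_natCast, pv_cmp_eq]
  simp only [pv_count_single, hs1, hs2]
  unfold pvRet pvBalance
  by_cases h1 : pvBHasCmp (s.drop (pos + 1)) <;>
    by_cases h2 : (s.take pos).count ')' < (s.take pos).count '('
  · by_cases h3 : pvAHasLogical s <;>
      rw [decide_eq_false (by omega)] <;> simp [h1, h2, h3]
  · by_cases h3 : pvAHasLogical s <;>
      rw [decide_eq_true (by omega)] <;> simp [h1, h2, h3]
  · simp [h1]
  · simp [h1]

theorem pvALoop_find? (s : List Char) (l : List Nat) :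
    pvALoop s l = (l.find? (pvRet s (pvAHasLogical s))).map (fun p => (p : Int)) := by
  induction l with
  | nil => simp [pvALoop]
  | cons pos rest ih =>
    rw [pvALoop_cons]
    cases hr : pvRet s (pvAHasLogical s) pos <;> simp [hr, ih]

theorem pvAPositions_eq (s : List Char) :
    pvAPositions s = (List.range s.length).filter (pvAIsLone s) := by
  unfold pvAPositions
  simpa using PySem.List.foldl_append_if (pvAIsLone s) (fun i => i) (List.range s.length) []

theorem pvA_eq_find? (s : List Char) :
    (let ps := pvAPositions s; if ps.isEmpty then none else pvALoop s ps) =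
      ((List.range s.length).find? (pvHit s (pvAHasLogical s))).map (fun p => (p : Int)) := by
  have hskip : ∀ l : List Nat, (if l.isEmpty then none else pvALoop s l) = pvALoop s l := by
    intro l; cases l <;> simp [pvALoop]
  show (if (pvAPositions s).isEmpty then none else pvALoop s (pvAPositions s)) = _
  rw [hskip, pvAPositions_eq, pvALoop_find?, List.find?_filter,
    pv_find?_congr _ (pvHit s (pvAHasLogical s)) _
      (by intro x _; simp [pvHit, Bool.decide_and, Bool.decide_eq_true])]

theorem pv_balance_succ (s : List Char) (i : Nat) (h : i < s.length) :
    pvBalance s (i + 1) =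
      pvBalance s i + (if s[i] = '(' then 1 else 0) - (if s[i] = ')' then 1 else 0) := by
  unfold pvBalance
  rw [List.take_add_one, List.getElem?_eq_getElem h]
  simp only [Option.toList_some, List.count_append, List.count_singleton, beq_eq_decide]
  by_cases h1 : s[i] = '(' <;> by_cases h2 : s[i] = ')' <;>
    simp [h1, h2] <;> omega

theorem pv_lone_head (s : List Char) (i : Nat) (c : Char) (h : s[i]? = some c) :
    (c == '=' &&
       !((decide (0 < i) && PySem.Chars.isIn [s.getD (i - 1) ' '] ['<','>','!','=']) ||
         (decide (i + 1 < s.length) && PySem.Chars.isIn [s.getD (i + 1) ' '] ['=','>'])))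
      = pvAIsLone s i := by
  have hEq : s.getD i ' ' = c := by simp [List.getD_eq_getElem?_getD, h]
  unfold pvAIsLone
  rw [PySem.List.pyGetD_natCast, hEq]
  by_cases hc : c = '='
  · subst hc
    simp only [beq_self_eq_true, Bool.true_and, if_pos]
    congr 1
    congr 1
    · by_cases hp : 0 < i
      · rw [if_pos hp, show ((i : Int) - 1) = ((i - 1 : Nat) : Int) by omega,
          PySem.List.pyGetD_natCast, pv_mem_singleton_isIn]
        simp [Bool.or_assoc, beq_eq_decide, hp]
      · simp [hp]
    · by_cases hn : i + 1 < s.length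
      · rw [if_pos hn, show ((i : Int) + 1) = ((i + 1 : Nat) : Int) by omega,
          PySem.List.pyGetD_natCast, pv_mem_singleton_isIn]
        simp [beq_eq_decide, hn]
      · simp [hn]
  · simp [show (c == '=') = false by simp [hc]]

theorem pv_lone_eq_char (s : List Char) (i : Nat) (h : i < s.length)
    (hl : pvAIsLone s i = true) : s[i] = '=' := by
  unfold pvAIsLone at hl
  rw [PySem.List.pyGetD_natCast, List.getD_eq_getElem?_getD, List.getElem?_eq_getElem h] at hl
  by_cases hc : s[i] = '='
  · exact hc
  · simp [show (s[i] == '=') = false by simp [hc]] at hl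

theorem pvBGo_find? (s : List Char) (hL : Bool) :
    ∀ (t : List Char) (i : Nat) (bal : Int), s.drop i = t → bal = pvBalance s i →
      pvBGo s hL (t.zipIdx i) bal =
        ((List.range' i t.length).find? (pvHit s hL)).map (fun p => (p : Int)) := by
  intro t
  induction t with
  | nil => intro i bal _ _; simp [pvBGo]
  | cons c t' ih =>
    intro i bal hdrop hbal
    have hget : s[i]? = some c := by
      rw [← List.head?_drop, hdrop]; rfl
    have hi : i < s.length := (List.getElem?_eq_some_iff.mp hget).1
    have hc : s[i] = c := by
      have := List.getElem?_eq_getElem hi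
      rw [hget] at this; exact (Option.some.injEq _ _).mp this.symm
    have hdrop' : s.drop (i + 1) = t' := by
      rw [← List.tail_drop, hdrop]; rfl
    subst hbal
    rw [List.zipIdx_cons, pvBGo, List.length_cons, List.range'_succ, List.find?_cons,
      pv_lone_head s i c hget,
      show (decide (pvBalance s i ≤ 0) || hL || !pvBHasCmp (s.drop (i + 1)))
        = pvRet s hL i from rfl]
    cases hlone : pvAIsLone s i with
    | true =>
      have hchar : c = '=' := hc ▸ pv_lone_eq_char s i hi hlone
      cases hret : pvRet s hL i with
      | true => simp [pvHit, hlone, hret]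
      | false =>
        have hne : pvHit s hL i = false := by simp [pvHit, hret]
        simp only [Bool.false_eq_true, if_false, hne]
        exact ih (i + 1) (pvBalance s i) hdrop'
          (by rw [pv_balance_succ s i hi, hc, hchar]; simp)
    | false =>
      have hne : pvHit s hL i = false := by simp [pvHit, hlone]
      simp only [Bool.false_eq_true, if_false, hne]
      by_cases h1 : c = '('
      · rw [if_pos (by simp [h1])]
        exact ih (i + 1) (pvBalance s i + 1) hdrop'
          (by rw [pv_balance_succ s i hi, hc, h1]; simp)
      · rw [if_neg (by simp [h1])]
        by_cases h2 : c = ')'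
        · rw [if_pos (by simp [h2])]
          exact ih (i + 1) (pvBalance s i - 1) hdrop'
            (by rw [pv_balance_succ s i hi, hc, h2]; simp)
        · rw [if_neg (by simp [h2])]
          exact ih (i + 1) (pvBalance s i) hdrop'
            (by rw [pv_balance_succ s i hi, hc]; simp [h1, h2])

-- ===== VERDICT (by name: the statement is the Claim_ definition above) =====
theorem find_lone_assignment_equals_py_spec : Claim_equal_find_lone_assignment_equals_py := by
  intro condition _
  unfold Spec_find_lone_assignment_equals_py
  unfold find_lone_assignment_equals_py find_lone_assignment_equals_py_alt
  set s := PySem.Chars.strip condition.toList with hs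
  rw [pvA_eq_find? s, List.range_eq_range']
  exact (pvBGo_find? s (pvBHasLogical s) s 0 0 (by simp) (by simp [pvBalance])).symm
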